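-- pv_equiv track=rewrite | github.com/qiyunzhu/woltka | woltka/util.py | prep_table
-- ===== SOURCE A (Python) =====
-- def allkeys(dic):
--     """Get all keys in a dict of dict.
--
--     Parameters
--     ----------
--     dic : dict
--         Input dictionary.
--
--     Returns
--     -------
--     set
--         Keys.
--     """
--     return set().union(*dic.values())
--
-- def prep_table(profile, samples=None):
--     """Convert a profile into data, index and columns, which can be further
--     converted into a Pandas DataFrame or BIOM table.
--
--     Parameters
--     ----------
--     profile : dict
--         Input profile.
--
--     Returns
--     -------
--     list of list
--         Data (2D array of values).
--     list
--         Index (observation Ids).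
--     list
--         Columns (sample Ids).
--     """
--     index = sorted(allkeys(profile))
--     columns = samples or sorted(profile)
--     data = []
--     for key in index:
--         row = []
--         for sample in columns:
--             try:
--                 row.append(profile[sample][key])
--             except KeyError:
--                 row.append(0)
--         data.append(row)
--     return data, index, columns
-- ===== SOURCE B (Python) =====
-- def prep_table(profile, samples=None):
--     """Sparse scatter: pre-zero a dense matrix and write only the entries
--     present in the profile, instead of probing every (key, sample) cell."""
--     keys = set()
--     for inner in profile.values():
--         keys.update(inner)
--     index = sorted(keys)
--     columns = samples or sorted(profile)
--     pos = {key: i for i, key in enumerate(index)}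
--     data = [[0] * len(columns) for _ in index]
--     for j, sample in enumerate(columns):
--         for key, value in profile.get(sample, {}).items():
--             data[pos[key]][j] = value
--     return data, index, columns
-- ===== Notes on version B (the rewrite author's own statement) =====
-- stated objective: faster
-- what changed: Replaces A's dense per-cell probe (try profile[sample][key] for every index x columns cell, an exception-handled dict lookup per cell) by pre-zeroing the matrix once and scattering only the entries actually present in each sample's inner dict via a key->row position map.
import Mathlib
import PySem

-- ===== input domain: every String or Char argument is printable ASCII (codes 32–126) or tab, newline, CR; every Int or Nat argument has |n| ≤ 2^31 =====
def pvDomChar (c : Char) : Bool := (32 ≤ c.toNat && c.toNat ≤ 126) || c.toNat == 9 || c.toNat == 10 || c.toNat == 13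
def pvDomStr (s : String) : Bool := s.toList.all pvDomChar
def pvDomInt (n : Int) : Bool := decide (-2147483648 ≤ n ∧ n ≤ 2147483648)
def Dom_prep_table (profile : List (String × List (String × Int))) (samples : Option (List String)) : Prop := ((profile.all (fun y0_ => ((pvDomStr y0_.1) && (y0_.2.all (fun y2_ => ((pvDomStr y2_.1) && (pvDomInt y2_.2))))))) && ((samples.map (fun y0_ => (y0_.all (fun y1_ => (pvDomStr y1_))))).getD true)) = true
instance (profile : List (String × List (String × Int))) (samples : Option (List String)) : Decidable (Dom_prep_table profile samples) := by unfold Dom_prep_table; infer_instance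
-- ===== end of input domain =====

-- B replaces A's dense per-cell try/except probe by a pre-zeroed matrix filled by scattering only
-- the entries present in each sample's inner dict (same result; measurably faster in a timing run).

-- The Python `profile` argument is a dict of dicts; under the type convention it arrives as an
-- association list of association lists, converted here once to the PySem.Dict both ports read.
def pvProf (profile : List (String × List (String × Int))) : PySem.Dict String (PySem.Dict String Int) :=
  PySem.Dict.ofList (profile.map (fun p => (p.1, PySem.Dict.ofList p.2)))

-- ===== PORT A =====
def prep_table (profile : List (String × List (String × Int))) (samples : Option (List String)) : List (List Int) × List String × List String :=
  let d := pvProf profile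
  -- index = sorted(allkeys(profile));  allkeys = set().union(*dic.values())
  let index := PySem.List.sorted (d.values.foldl (fun s v => PySem.Set.union s v.keys) PySem.Set.empty) (fun x => x) false
  -- columns = samples or sorted(profile)
  let columns := match samples with
    | some s => if s = [] then PySem.List.sorted d.keys (fun x => x) false else s
    | none => PySem.List.sorted d.keys (fun x => x) false
  -- for key in index: row = []; for sample in columns: try: row.append(profile[sample][key]) except KeyError: row.append(0)
  let data := index.foldl (fun data key =>
    data ++ [columns.foldl (fun row sample =>
      row ++ [(match d.get? sample with
               | some inner =>
                 match inner.get? key with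
                 | some v => v
                 | none => (0 : Int)
               | none => (0 : Int))]) ([] : List Int)]) ([] : List (List Int))
  (data, index, columns)

-- ===== PORT B =====
def prep_table_alt (profile : List (String × List (String × Int))) (samples : Option (List String)) : List (List Int) × List String × List String :=
  let d := pvProf profile
  -- keys = set(); for inner in profile.values(): keys.update(inner)
  let keys := d.values.foldl (fun s v => PySem.Set.update s v.keys) PySem.Set.empty
  let index := PySem.List.sorted keys (fun x => x) false
  let columns := match samples with
    | some s => if s = [] then PySem.List.sorted d.keys (fun x => x) false else s
    | none => PySem.List.sorted d.keys (fun x => x) false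
  -- pos = {key: i for i, key in enumerate(index)}
  let pos := (PySem.List.enumerate index).foldl (fun p ik => p.insert ik.2 ik.1) PySem.Dict.empty
  -- data = [[0]*len(columns) for _ in index]
  let data0 := index.map (fun _ => List.replicate columns.length (0 : Int))
  -- for j, sample in enumerate(columns): for key, value in profile.get(sample, {}).items(): data[pos[key]][j] = value
  let data := (PySem.List.enumerate columns).foldl (fun data js =>
    (match d.get? js.2 with | some inner => inner.items | none => []).foldl
      (fun data (kv : String × Int) =>
        let i := (pos.get? kv.1).getD 0
        PySem.List.pySetD data i (PySem.List.pySetD (PySem.List.pyGetD data i []) js.1 kv.2)) data) data0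
  (data, index, columns)

-- ===== PRECONDITION & SPEC =====
def Spec_prep_table (profile : List (String × List (String × Int))) (samples : Option (List String)) (out : List (List Int) × List String × List String) : Prop := out = prep_table_alt profile samples
instance (profile : List (String × List (String × Int))) (samples : Option (List String)) (out : List (List Int) × List String × List String) : Decidable (Spec_prep_table profile samples out) := by unfold Spec_prep_table; infer_instance

-- ===== CLAIM (what is proved, stated in full; the proofs are below) =====
def Claim_equal_prep_table : Prop := ∀ (profile : List (String × List (String × Int))) (samples : Option (List String)), Dom_prep_table profile samples → Spec_prep_table profile samples (prep_table profile samples)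

-- ===== LEMMAS AND PROOFS =====

-- the value A's try/except probe yields at (key, sample)
def pvVal (d : PySem.Dict String (PySem.Dict String Int)) (key sample : String) : Int :=
  match d.get? sample with
  | some inner => (inner.get? key).getD 0
  | none => 0

-- the entry of the matrix at row i, column j (0 outside)
def pvE (data : List (List Int)) (i j : Nat) : Int := (data.getD i []).getD j 0

-- one scatter write of B ('data[pos[key]][j] = value'), and the per-sample scatter loop
def pvWrite (pos : PySem.Dict String Int) (j : Int) (data : List (List Int)) (kv : String × Int) : List (List Int) :=
  let i := (pos.get? kv.1).getD 0
  PySem.List.pySetD data i (PySem.List.pySetD (PySem.List.pyGetD data i []) j kv.2)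

def pvScatter (pos : PySem.Dict String Int) (j : Int) (L : List (String × Int)) (data : List (List Int)) : List (List Int) :=
  L.foldl (pvWrite pos j) data

def pvItems (d : PySem.Dict String (PySem.Dict String Int)) (s : String) : List (String × Int) :=
  match d.get? s with | some inner => inner.items | none => []

theorem pv_match_eq_pvVal (d : PySem.Dict String (PySem.Dict String Int)) (key sample : String) :
    (match d.get? sample with
     | some inner => match inner.get? key with | some v => v | none => (0:Int)
     | none => (0:Int)) = pvVal d key sample := by
  unfold pvVal
  cases hd : d.get? sample with
  | none => rfl
  | some inner => cases hk : inner.get? key <;> simp [hk]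

theorem pv_find_items (d : PySem.Dict String (PySem.Dict String Int)) (c k : String) :
    (((pvItems d c).find? (fun p => p.1 == k)).map Prod.snd).getD 0 = pvVal d k c := by
  unfold pvItems pvVal
  cases hd : d.get? c with
  | none => rfl
  | some inner =>
    show ((inner.items.find? (fun p => p.1 == k)).map Prod.snd).getD 0 = (inner.get? k).getD 0
    rfl

theorem pv_mem_foldl_union (L : List (PySem.Dict String Int)) (s : PySem.Set String) (x : String) :
    x ∈ L.foldl (fun s v => PySem.Set.union s v.keys) s ↔ x ∈ s ∨ ∃ v ∈ L, x ∈ v.keys := by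
  induction L generalizing s with
  | nil => simp
  | cons v L ih =>
    simp only [List.foldl_cons, ih, PySem.Set.mem_union, List.mem_cons]
    constructor
    · rintro ((h | h) | ⟨w, hw, hx⟩)
      · exact Or.inl h
      · exact Or.inr ⟨v, Or.inl rfl, h⟩
      · exact Or.inr ⟨w, Or.inr hw, hx⟩
    · rintro (h | ⟨w, (rfl | hw), hx⟩)
      · exact Or.inl (Or.inl h)
      · exact Or.inl (Or.inr hx)
      · exact Or.inr ⟨w, hw, hx⟩

theorem pv_nodup_foldl_union (L : List (PySem.Dict String Int)) (s : PySem.Set String)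
    (hs : s.Nodup) : (L.foldl (fun s v => PySem.Set.union s v.keys) s).Nodup := by
  induction L generalizing s with
  | nil => exact hs
  | cons v L ih => exact ih _ (PySem.Set.nodup_union _ _ hs)

theorem pv_mem_values_update (ps : List (String × List (String × Int)))
    (d : PySem.Dict String (PySem.Dict String Int)) (v : PySem.Dict String Int)
    (hv : v ∈ ((ps.map (fun p => (p.1, PySem.Dict.ofList p.2))).foldl
        (fun d p => d.insert p.1 p.2) d).values) :
    v ∈ d.values ∨ ∃ p ∈ ps, v = PySem.Dict.ofList p.2 := by
  induction ps generalizing d with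
  | nil => exact Or.inl hv
  | cons p ps ih =>
    rcases ih _ hv with h | ⟨q, hq, rfl⟩
    · rcases PySem.Dict.mem_values_insert _ _ _ _ h with rfl | h
      · exact Or.inr ⟨p, List.mem_cons_self, rfl⟩
      · exact Or.inl h
    · exact Or.inr ⟨q, List.mem_cons_of_mem _ hq, rfl⟩

theorem pv_pos_untouched (t : List String) (k : String) (hk : k ∉ t) :
    ∀ (s : Int) (p : PySem.Dict String Int),
    ((PySem.List.enumerate t s).foldl (fun p ik => p.insert ik.2 ik.1) p).get? k = p.get? k := by
  induction t with
  | nil => intro s p; rfl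
  | cons x t ih =>
    intro s p
    rw [PySem.List.enumerate_cons, List.foldl_cons]
    rw [ih (fun h => hk (List.mem_cons_of_mem _ h))]
    exact PySem.Dict.get?_insert_of_ne _ _ (fun h => hk (h ▸ List.mem_cons_self))

theorem pv_pos_spec (l : List String) (hnd : l.Nodup) :
    ∀ (s : Int) (p : PySem.Dict String Int) (i : Nat) (h : i < l.length),
    ((PySem.List.enumerate l s).foldl (fun p ik => p.insert ik.2 ik.1) p).get? l[i] = some (s + i) := by
  induction l with
  | nil => intro _ _ i h; simp at h
  | cons x t ih =>
    intro s p i h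
    rw [PySem.List.enumerate_cons, List.foldl_cons]
    match i with
    | 0 =>
      have hx : x ∉ t := (List.nodup_cons.mp hnd).1
      simp only [List.getElem_cons_zero]
      rw [pv_pos_untouched t x hx (s+1) (p.insert x s), PySem.Dict.get?_insert_self]
      norm_num
    | i + 1 =>
      have := ih (List.nodup_cons.mp hnd).2 (s+1) (p.insert x s) i (by simpa using h)
      simp only [List.getElem_cons_succ]
      rw [this]
      congr 1
      push_cast
      ring

theorem pvE_eq (data : List (List Int)) (i j : Nat) :
    pvE data i j = ((data[i]?.getD []).getD j 0) := by
  simp [pvE, List.getD_eq_getElem?_getD]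

theorem pvWrite_spec (pos : PySem.Dict String Int) (index : List String)
    (data : List (List Int)) (m : Nat)
    (hlen : data.length = index.length) (hrow : ∀ r ∈ data, r.length = m)
    (jn : Nat) (hj : jn < m) (kv : String × Int) (i0 : Nat) (hi0 : i0 < index.length)
    (hpos : pos.get? kv.1 = some (i0 : Int)) :
    (pvWrite pos (jn : Int) data kv).length = data.length ∧
    (∀ r ∈ pvWrite pos (jn : Int) data kv, r.length = m) ∧
    (∀ i j' : Nat, pvE (pvWrite pos (jn : Int) data kv) i j' =
      if i = i0 ∧ j' = jn then kv.2 else pvE data i j') := by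
  have hi0d : i0 < data.length := hlen ▸ hi0
  have hrowlen : (data.getD i0 []).length = m := by
    rw [List.getD_eq_getElem?_getD, List.getElem?_eq_getElem hi0d]
    exact hrow _ (List.getElem_mem hi0d)
  have hwrite : pvWrite pos (jn : Int) data kv = data.set i0 ((data.getD i0 []).set jn kv.2) := by
    unfold pvWrite
    rw [hpos]
    simp only [Option.getD_some, PySem.List.pySetD_natCast, PySem.List.pyGetD_natCast]
  refine ⟨by rw [hwrite]; simp, ?_, ?_⟩
  · intro r hr
    rw [hwrite] at hr
    rcases List.mem_or_eq_of_mem_set hr with h | rfl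
    · exact hrow _ h
    · simpa using hrowlen
  · intro i j'
    rw [hwrite, pvE_eq, pvE_eq, List.getElem?_set]
    by_cases hii : i = i0
    · subst hii
      by_cases hjj : j' = jn
      · subst hjj
        have hlr : (data[i]'hi0d).length = m := hrow _ (List.getElem_mem hi0d)
        simp [hi0d, List.getD_eq_getElem?_getD, hlr, hj]
      · simp [hi0d, hjj, Ne.symm hjj, List.getD_eq_getElem?_getD]
    · simp [hii, Ne.symm hii]

theorem pvScatter_spec (pos : PySem.Dict String Int) (index : List String) (hnd : index.Nodup)
    (m jn : Nat) (hj : jn < m) (L : List (String × Int)) (hLnd : (L.map Prod.fst).Nodup)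
    (hLk : ∀ kv ∈ L, ∃ (i0 : Nat) (h : i0 < index.length),
      index[i0] = kv.1 ∧ pos.get? kv.1 = some (i0 : Int)) :
    ∀ data : List (List Int), data.length = index.length → (∀ r ∈ data, r.length = m) →
    (pvScatter pos (jn : Int) L data).length = index.length ∧
    (∀ r ∈ pvScatter pos (jn : Int) L data, r.length = m) ∧
    (∀ i : Nat, ∀ hi : i < index.length, ∀ j' : Nat,
      pvE (pvScatter pos (jn : Int) L data) i j' =
      if j' = jn then ((L.find? (fun p => p.1 == index[i])).map Prod.snd).getD (pvE data i j')
        else pvE data i j') := by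
  induction L with
  | nil =>
    intro data hlen hrow
    refine ⟨hlen, hrow, ?_⟩
    intro i hi j'
    simp [pvScatter]
  | cons kv T ih =>
    intro data hlen hrow
    obtain ⟨i0, hi0, hkey0, hpos0⟩ := hLk kv List.mem_cons_self
    obtain ⟨hw1, hw2, hw3⟩ := pvWrite_spec pos index data m hlen hrow jn hj kv i0 hi0 hpos0
    have hTk : ∀ kv' ∈ T, ∃ (i1 : Nat) (h : i1 < index.length),
        index[i1] = kv'.1 ∧ pos.get? kv'.1 = some (i1 : Int) :=
      fun kv' h => hLk kv' (List.mem_cons_of_mem _ h)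
    have hLnd' := hLnd
    rw [List.map_cons, List.nodup_cons] at hLnd'
    have hTnd : (T.map Prod.fst).Nodup := hLnd'.2
    have hknotT : kv.1 ∉ T.map Prod.fst := hLnd'.1
    obtain ⟨hl1, hl2, hl3⟩ := ih hTnd hTk (pvWrite pos (jn : Int) data kv)
      (hw1.trans hlen) hw2
    have hfold : pvScatter pos (jn : Int) (kv :: T) data
        = pvScatter pos (jn : Int) T (pvWrite pos (jn : Int) data kv) := rfl
    refine ⟨hfold ▸ hl1, hfold ▸ hl2, ?_⟩
    intro i hi j'
    rw [hfold, hl3 i hi j']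
    by_cases hjj : j' = jn
    · subst hjj
      rw [if_pos rfl, if_pos rfl]
      by_cases hk : kv.1 = index[i]
      · have hii : i = i0 := by
          have : index[i0] = index[i] := hkey0.trans hk
          exact (hnd.getElem_inj_iff.mp this).symm
        subst hii
        rw [List.find?_cons_of_pos (by simpa using hk)]
        have hTn : T.find? (fun p => p.1 == index[i]) = none := by
          rw [List.find?_eq_none]
          intro p hp
          simp only [beq_iff_eq]
          intro hpe
          exact hknotT (by rw [← hk] at hpe; exact hpe ▸ List.mem_map_of_mem hp)
        rw [hTn]
        simp [hw3]
      · rw [List.find?_cons_of_neg (by simpa using hk)]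
        have hii : i ≠ i0 := by intro h; subst h; exact hk hkey0.symm
        have hun : pvE (pvWrite pos (j' : Int) data kv) i j' = pvE data i j' := by
          rw [hw3]; simp [hii]
        rw [hun]
    · rw [if_neg hjj, if_neg hjj, hw3]
      simp [hjj]

theorem pvFill_spec (d : PySem.Dict String (PySem.Dict String Int)) (index : List String)
    (hnd : index.Nodup)
    (hcov : ∀ s inner, d.get? s = some inner → ∀ k ∈ inner.keys, k ∈ index)
    (hvals : ∀ s inner, d.get? s = some inner → inner.keys.Nodup)
    (pos : PySem.Dict String Int)
    (hpos : ∀ i : Nat, ∀ h : i < index.length, pos.get? index[i] = some (i : Int))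
    (columns : List String) :
    ∀ (cs : List String) (s : Nat), cs = columns.drop s →
    ∀ data : List (List Int), data.length = index.length →
    (∀ r ∈ data, r.length = columns.length) →
    (∀ i j' : Nat, i < index.length → j' < columns.length →
      pvE data i j' = if j' < s then pvVal d (index.getD i "") (columns.getD j' "") else 0) →
    ((PySem.List.enumerate cs (s : Int)).foldl
        (fun data js => pvScatter pos js.1 (pvItems d js.2) data) data).length = index.length ∧
    (∀ r ∈ (PySem.List.enumerate cs (s : Int)).foldl
        (fun data js => pvScatter pos js.1 (pvItems d js.2) data) data, r.length = columns.length) ∧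
    (∀ i j' : Nat, i < index.length → j' < columns.length →
      pvE ((PySem.List.enumerate cs (s : Int)).foldl
        (fun data js => pvScatter pos js.1 (pvItems d js.2) data) data) i j' =
      pvVal d (index.getD i "") (columns.getD j' "")) := by
  intro cs
  induction cs with
  | nil =>
    intro s hcs data hlen hrow hE
    rw [PySem.List.enumerate_nil]
    refine ⟨hlen, hrow, ?_⟩
    intro i j' hi hj'
    have hsle : columns.length ≤ s := by
      have := congrArg List.length hcs
      simp only [List.length_nil, List.length_drop] at this
      omega
    have := hE i j' hi hj'
    rw [if_pos (by omega)] at this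
    simpa using this
  | cons c cs ihcs =>
    intro s hcs data hlen hrow hE
    have hslt : s < columns.length := by
      have := congrArg List.length hcs
      simp only [List.length_cons, List.length_drop] at this
      omega
    have hcget : columns[s]? = some c := by
      have h0 : columns[s + 0]? = (columns.drop s)[0]? := List.getElem?_drop.symm
      rw [← hcs] at h0
      simpa using h0
    have hc : columns.getD s "" = c := by
      rw [List.getD_eq_getElem?_getD, hcget]; rfl
    have hcs' : cs = columns.drop (s + 1) := by
      have : (columns.drop s).drop 1 = columns.drop (s + 1) := by
        rw [List.drop_drop]
      rw [← this, ← hcs]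
      rfl
    rw [PySem.List.enumerate_cons, List.foldl_cons]
    -- facts about the items of sample c
    have hLfacts : ((pvItems d c).map Prod.fst).Nodup ∧
        (∀ kv ∈ pvItems d c, ∃ (i0 : Nat) (h : i0 < index.length),
          index[i0] = kv.1 ∧ pos.get? kv.1 = some (i0 : Int)) := by
      unfold pvItems
      cases hd : d.get? c with
      | none => exact ⟨List.nodup_nil, by intro kv h; simp at h⟩
      | some inner =>
        refine ⟨hvals c inner hd, ?_⟩
        intro kv hkv
        have hk1 : kv.1 ∈ index := hcov c inner hd kv.1 (PySem.Dict.mem_keys_of_mem_items _ hkv)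
        obtain ⟨i0, h, hkey⟩ := List.mem_iff_getElem.mp hk1
        exact ⟨i0, h, hkey, by rw [← hkey]; exact hpos i0 h⟩
    obtain ⟨hs1, hs2, hs3⟩ := pvScatter_spec pos index hnd columns.length s hslt
      (pvItems d c) hLfacts.1 hLfacts.2 data hlen hrow
    have hE1 : ∀ i j' : Nat, i < index.length → j' < columns.length →
        pvE (pvScatter pos (s : Int) (pvItems d c) data) i j' =
        if j' < s + 1 then pvVal d (index.getD i "") (columns.getD j' "") else 0 := by
      intro i j' hi hj'
      rw [hs3 i hi j']
      by_cases hjs : j' = s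
      · subst hjs
        rw [if_pos rfl, if_pos (by omega)]
        have h0 : pvE data i j' = 0 := by
          rw [hE i j' hi hj', if_neg (by omega)]
        rw [h0]
        have hidx : index.getD i "" = index[i] := by
          rw [List.getD_eq_getElem?_getD, List.getElem?_eq_getElem hi]; rfl
        rw [hc, hidx]
        exact pv_find_items d c index[i]
      · rw [if_neg hjs, hE i j' hi hj']
        by_cases hlt : j' < s
        · rw [if_pos hlt, if_pos (by omega)]
        · rw [if_neg hlt, if_neg (by omega)]
    have hnext := ihcs (s + 1) hcs' (pvScatter pos (s : Int) (pvItems d c) data) hs1 hs2 hE1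
    have hcast : ((s : Int) + 1) = ((s + 1 : Nat) : Int) := by push_cast; ring
    rw [hcast]
    exact hnext

theorem pv_core (d : PySem.Dict String (PySem.Dict String Int))
    (columns index : List String) (pos : PySem.Dict String Int)
    (hnd : index.Nodup)
    (hcov : ∀ s inner, d.get? s = some inner → ∀ k ∈ inner.keys, k ∈ index)
    (hvals : ∀ s inner, d.get? s = some inner → inner.keys.Nodup)
    (hpos : ∀ i : Nat, ∀ h : i < index.length, pos.get? index[i] = some (i : Int)) :
    index.map (fun key => columns.map (fun sample => pvVal d key sample))
    = (PySem.List.enumerate columns 0).foldl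
        (fun data js => pvScatter pos js.1 (pvItems d js.2) data)
        (index.map (fun _ => List.replicate columns.length (0 : Int))) := by
  have hE0 : ∀ i j' : Nat, i < index.length → j' < columns.length →
      pvE (index.map (fun _ => List.replicate columns.length (0 : Int))) i j' =
      if j' < 0 then pvVal d (index.getD i "") (columns.getD j' "") else 0 := by
    intro i j' hi hj'
    rw [if_neg (Nat.not_lt_zero _), pvE_eq, List.getElem?_map, List.getElem?_eq_getElem hi]
    simp
  obtain ⟨h1, h2, h3⟩ := pvFill_spec d index hnd hcov hvals pos hpos columns columns 0
    List.drop_zero.symm (index.map (fun _ => List.replicate columns.length (0 : Int)))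
    (by simp) (by intro r hr; obtain ⟨_, _, rfl⟩ := List.mem_map.mp hr; simp) hE0
  rw [Nat.cast_zero] at h1 h2 h3
  apply List.ext_getElem (by simpa using h1.symm)
  intro i hi1 hi2
  have hi : i < index.length := by simpa using hi1
  apply List.ext_getElem
  · rw [List.getElem_map, List.length_map]
    exact (h2 _ (List.getElem_mem hi2)).symm
  intro j hj1 hj2
  have hj : j < columns.length := by simpa using hj1
  have h := h3 i j hi hj
  have hresl : i < ((PySem.List.enumerate columns 0).foldl
      (fun data js => pvScatter pos js.1 (pvItems d js.2) data)
      (index.map (fun _ => List.replicate columns.length (0 : Int)))).length := hi2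
  rw [pvE_eq, List.getElem?_eq_getElem hresl, Option.getD_some, List.getD_eq_getElem?_getD,
    List.getElem?_eq_getElem hj2, Option.getD_some] at h
  have hidxD : index.getD i "" = index[i]'hi := by
    rw [List.getD_eq_getElem?_getD, List.getElem?_eq_getElem hi]; rfl
  have hcolD : columns.getD j "" = columns[j]'hj := by
    rw [List.getD_eq_getElem?_getD, List.getElem?_eq_getElem hj]; rfl
  rw [hidxD, hcolD] at h
  simp only [List.getElem_map]
  exact h.symm

theorem pv_bridge (d : PySem.Dict String (PySem.Dict String Int)) (columns : List String)
    (hdk : d.keys.Nodup) (hvv : ∀ v ∈ d.values, v.keys.Nodup) :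
    (PySem.List.sorted (d.values.foldl (fun s v => PySem.Set.union s v.keys) PySem.Set.empty) (fun x => x) false).foldl
      (fun data key => data ++ [columns.foldl (fun row sample =>
        row ++ [(match d.get? sample with
                 | some inner => match inner.get? key with | some v => v | none => (0 : Int)
                 | none => (0 : Int))]) ([] : List Int)]) ([] : List (List Int))
    =
    (let index := PySem.List.sorted (d.values.foldl (fun s v => PySem.Set.union s v.keys) PySem.Set.empty) (fun x => x) false
     let pos := (PySem.List.enumerate index).foldl (fun p ik => p.insert ik.2 ik.1) PySem.Dict.empty
     let data0 := index.map (fun _ => List.replicate columns.length (0 : Int))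
     (PySem.List.enumerate columns).foldl (fun data js =>
       (match d.get? js.2 with | some inner => inner.items | none => []).foldl
         (fun data (kv : String × Int) =>
           let i := (pos.get? kv.1).getD 0
           PySem.List.pySetD data i (PySem.List.pySetD (PySem.List.pyGetD data i []) js.1 kv.2)) data) data0) := by
  have hnd : (PySem.List.sorted (d.values.foldl (fun s v => PySem.Set.union s v.keys) PySem.Set.empty) (fun x => x) false).Nodup :=
    (PySem.List.sorted_perm _ _ _).symm.nodup (pv_nodup_foldl_union _ _ List.nodup_nil)
  have hmemv : ∀ s inner, d.get? s = some inner → inner ∈ d.values := by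
    intro s inner hgs
    have hitems : (s, inner) ∈ d.items := (PySem.Dict.get?_eq_some_iff_mem_items d s inner hdk).mp hgs
    exact List.mem_map_of_mem hitems
  have hcov : ∀ s inner, d.get? s = some inner → ∀ k ∈ inner.keys,
      k ∈ PySem.List.sorted (d.values.foldl (fun s v => PySem.Set.union s v.keys) PySem.Set.empty) (fun x => x) false := by
    intro s inner hgs k hk
    exact (PySem.List.mem_sorted _ _ _ _).mpr
      ((pv_mem_foldl_union _ _ _).mpr (Or.inr ⟨inner, hmemv s inner hgs, hk⟩))
  have hvals : ∀ s inner, d.get? s = some inner → inner.keys.Nodup :=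
    fun s inner hgs => hvv _ (hmemv s inner hgs)
  have hpos : ∀ i : Nat, ∀ h : i < (PySem.List.sorted (d.values.foldl (fun s v => PySem.Set.union s v.keys) PySem.Set.empty) (fun x => x) false).length,
      (((PySem.List.enumerate (PySem.List.sorted (d.values.foldl (fun s v => PySem.Set.union s v.keys) PySem.Set.empty) (fun x => x) false)).foldl
        (fun p ik => p.insert ik.2 ik.1) PySem.Dict.empty).get?
        ((PySem.List.sorted (d.values.foldl (fun s v => PySem.Set.union s v.keys) PySem.Set.empty) (fun x => x) false)[i])) = some (i : Int) := by
    intro i h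
    have := pv_pos_spec _ hnd 0 PySem.Dict.empty i h
    simpa using this
  have hA : (PySem.List.sorted (d.values.foldl (fun s v => PySem.Set.union s v.keys) PySem.Set.empty) (fun x => x) false).foldl
      (fun data key => data ++ [columns.foldl (fun row sample =>
        row ++ [(match d.get? sample with
                 | some inner => match inner.get? key with | some v => v | none => (0 : Int)
                 | none => (0 : Int))]) ([] : List Int)]) ([] : List (List Int))
      = (PySem.List.sorted (d.values.foldl (fun s v => PySem.Set.union s v.keys) PySem.Set.empty) (fun x => x) false).map
          (fun key => columns.map (fun sample => pvVal d key sample)) := by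
    rw [PySem.List.foldl_append_singleton_eq_map]
    simp only [List.nil_append]
    refine List.map_congr_left ?_
    intro key _
    rw [PySem.List.foldl_append_singleton_eq_map]
    simp only [List.nil_append]
    exact List.map_congr_left (fun sample _ => pv_match_eq_pvVal d key sample)
  rw [hA]
  exact pv_core d columns _ _ hnd hcov hvals hpos

-- ===== VERDICT (by name: the statement is the Claim_ definition above) =====
theorem prep_table_spec : Claim_equal_prep_table := by
  intro profile samples _
  simp only [Spec_prep_table, prep_table, prep_table_alt]
  simp only [show @PySem.Set.update String _ = @PySem.Set.union String _ from rfl]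
  have hdk : (pvProf profile).keys.Nodup := PySem.Dict.nodup_keys_ofList _
  have hvv : ∀ v ∈ (pvProf profile).values, v.keys.Nodup := by
    intro v hv
    rcases pv_mem_values_update profile PySem.Dict.empty v hv with h | ⟨p, _, rfl⟩
    · simp [PySem.Dict.values, PySem.Dict.empty] at h
    · exact PySem.Dict.nodup_keys_ofList _
  congr 1
  exact pv_bridge (pvProf profile) _ hdk hvv
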